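-- pv_equiv track=rewrite | github.com/tanashou1/ahc003 | step.py | convert_without_line
-- ===== SOURCE A (Python) =====
-- def convert_without_line(x, h, v):
--     column = len(h) + 1
--     row = len(h[0])
--
--     h_dim = len(h) * len(h[0])
--     v_dim = len(v) * len(v[0])
--
--     line_dim = row + column
--
--     line = x[-line_dim:]
--
--     ans = x[:-line_dim]
--
--     for a, _ in enumerate(ans):
--         if a < h_dim:
--             j = a // (column - 1)
--             ans[a] += line[j]
--         else:
--             i = (a - h_dim) % column
--             ans[a] += line[i + row]
--
--     return ans
-- ===== SOURCE B (Python) =====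
-- def convert_without_line(x, h, v):
--     k = len(h)
--     row = len(h[0])
--     line_dim = row + k + 1
--     ans = x[:-line_dim]
--     if not ans:
--         return ans
--     line = x[-line_dim:]
--     # offset table: h-block = each of line[:row] repeated k times, then cycle over line[row:]
--     offsets = [w for w in line[:row] for _ in range(k)]
--     cyc = line[row:]
--     i = 0
--     while len(offsets) < len(ans):
--         offsets.append(cyc[i % (k + 1)])
--         i += 1
--     return [a + o for a, o in zip(ans, offsets)]
-- ===== Notes on version B (the rewrite author's own statement) =====
-- stated objective: alternative
-- what changed: Instead of A's single interleaved loop that branches per element and computes a line index with // or %, B first materialises the whole offset table (each head offset replicated k times, then the tail offsets cycled) and applies it with one branch-free zip-add.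
import Mathlib
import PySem

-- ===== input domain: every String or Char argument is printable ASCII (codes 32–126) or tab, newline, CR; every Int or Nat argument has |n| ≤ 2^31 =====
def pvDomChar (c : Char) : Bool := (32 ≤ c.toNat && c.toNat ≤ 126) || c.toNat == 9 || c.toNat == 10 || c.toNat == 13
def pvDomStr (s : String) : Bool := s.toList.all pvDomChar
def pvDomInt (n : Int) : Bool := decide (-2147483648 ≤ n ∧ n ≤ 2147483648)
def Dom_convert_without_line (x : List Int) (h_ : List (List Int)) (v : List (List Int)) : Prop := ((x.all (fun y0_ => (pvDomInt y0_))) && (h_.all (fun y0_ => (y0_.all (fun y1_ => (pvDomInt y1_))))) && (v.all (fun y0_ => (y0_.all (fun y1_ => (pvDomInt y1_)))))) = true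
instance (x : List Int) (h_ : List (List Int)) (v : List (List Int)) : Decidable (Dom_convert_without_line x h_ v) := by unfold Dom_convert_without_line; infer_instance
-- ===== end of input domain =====

-- B builds the whole offset table (head offsets replicated, tail offsets cycled) first and
-- applies it with one branch-free zip-add, instead of A's interleaved per-element branch loop.
-- Return-value equivalence; neither program mutates its arguments (Python slicing copies).

-- ===== PORT A =====
-- Loop indices a are nonnegative, so Python's a // (column-1) and (a-h_dim) % column are
-- Nat division / Nat mod here.  'for a, _ in enumerate(ans)' ignores the element and the list
-- length is never changed by the loop, so it is a fold over List.range ans.length.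
-- line[j] never goes out of range where A returns (see Pre_), so getD 0 is exact there.
def convert_without_line (x : List Int) (h_ : List (List Int)) (v : List (List Int)) : List Int :=
  let column : Nat := h_.length + 1
  let row : Nat := (h_.headD []).length
  let h_dim : Nat := h_.length * (h_.headD []).length
  let _v_dim : Nat := v.length * (v.headD []).length
  let line_dim : Nat := row + column
  let line := PySem.List.slice x (some (-(line_dim : Int))) none
  let ans := PySem.List.slice x none (some (-(line_dim : Int)))
  (List.range ans.length).foldl (fun cur a =>
    if a < h_dim then
      cur.set a (cur.getD a 0 + line.getD (a / (column - 1)) 0)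
    else
      cur.set a (cur.getD a 0 + line.getD ((a - h_dim) % column + row) 0)) ans

-- ===== PORT B =====
-- the 'while len(offsets) < len(ans): offsets.append(cyc[i % (k+1)]); i += 1' loop of Source B
def extendCyc (cyc : List Int) (k1 : Nat) : Nat → Nat → List Int
  | 0, _ => []
  | m + 1, i => cyc.getD (i % k1) 0 :: extendCyc cyc k1 m (i + 1)

def convert_without_line_alt (x : List Int) (h_ : List (List Int)) (v : List (List Int)) : List Int :=
  let k : Nat := h_.length
  let row : Nat := (h_.headD []).length
  let line_dim : Nat := row + k + 1
  let ans := PySem.List.slice x none (some (-(line_dim : Int)))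
  if ans.isEmpty then ans else
  let line := PySem.List.slice x (some (-(line_dim : Int))) none
  let offsets := (line.take row).flatMap (fun w => List.replicate k w)
  let cyc := line.drop row
  let offsets2 := offsets ++ extendCyc cyc (k + 1) (ans.length - offsets.length) 0
  (ans.zip offsets2).map (fun p => p.1 + p.2)

-- ===== PRECONDITION & SPEC =====
-- A raises IndexError on h = [] (at len(h[0])) and on v = [] (at len(v[0])); everywhere else it returns.
def Pre_convert_without_line (x : List Int) (h_ : List (List Int)) (v : List (List Int)) : Prop := h_ ≠ [] ∧ v ≠ []
instance (x : List Int) (h_ : List (List Int)) (v : List (List Int)) : Decidable (Pre_convert_without_line x h_ v) := by unfold Pre_convert_without_line; infer_instance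
def pvWitness_convert_without_line : List Int × List (List Int) × List (List Int) := ([1, 2, 3, 4, 5, 6, 7], [[1, 2]], [[3]])

def Spec_convert_without_line (x : List Int) (h_ : List (List Int)) (v : List (List Int)) (out : List Int) : Prop := out = convert_without_line_alt x h_ v
instance (x : List Int) (h_ : List (List Int)) (v : List (List Int)) (out : List Int) : Decidable (Spec_convert_without_line x h_ v out) := by unfold Spec_convert_without_line; infer_instance

-- ===== CLAIM (what is proved, stated in full; the proofs are below) =====
def Claim_equal_convert_without_line : Prop := ∀ (x : List Int) (h_ : List (List Int)) (v : List (List Int)), Dom_convert_without_line x h_ v → Pre_convert_without_line x h_ v → Spec_convert_without_line x h_ v (convert_without_line x h_ v)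

-- ===== LEMMAS AND PROOFS =====

theorem extendCyc_length (cyc : List Int) (k1 m i : Nat) : (extendCyc cyc k1 m i).length = m := by
  induction m generalizing i with
  | zero => rfl
  | succ m ih => simp [extendCyc, ih]

theorem extendCyc_getD (cyc : List Int) (k1 m i p : Nat) (hp : p < m) :
    (extendCyc cyc k1 m i).getD p 0 = cyc.getD ((i + p) % k1) 0 := by
  induction m generalizing i p with
  | zero => omega
  | succ m ih =>
    cases p with
    | zero => simp [extendCyc]
    | succ p =>
      simp only [extendCyc, List.getD_cons_succ]
      rw [ih _ _ (by omega)]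
      ring_nf

theorem flatMap_replicate_getD (l : List Int) (k a : Nat) (hk : 0 < k) (ha : a < l.length * k) :
    (l.flatMap (fun w => List.replicate k w)).getD a 0 = l.getD (a / k) 0 := by
  induction l generalizing a with
  | nil => simp at ha
  | cons w t ih =>
    simp only [List.flatMap_cons]
    by_cases h : a < k
    · rw [List.getD_append _ _ _ _ (by simpa using h)]
      simp [List.getD, Nat.div_eq_of_lt h, h]
    · rw [List.getD_append_right _ _ _ _ (by simpa using h)]
      simp only [List.length_replicate]
      have hmul : (w :: t).length * k = t.length * k + k := by
        simp [Nat.succ_mul]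
      rw [ih (a - k) (by omega)]
      have : a / k = (a - k) / k + 1 := by
        rw [Nat.div_eq_sub_div hk (by omega)]
      rw [this]
      simp [List.getD]

-- A's in-place loop: indices are set left to right, so untouched entries keep their value.
theorem foldl_set_range (f : Nat → Int) (ans : List Int) (m : Nat) (hm : m ≤ ans.length) :
    (List.range m).foldl (fun cur a => cur.set a (cur.getD a 0 + f a)) ans
      = ans.mapIdx (fun i y => if i < m then y + f i else y) := by
  induction m with
  | zero => apply List.ext_getElem <;> simp
  | succ m ih =>
    rw [List.range_succ, List.foldl_append, ih (by omega)]
    simp only [List.foldl_cons, List.foldl_nil]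
    apply List.ext_getElem
    · simp
    · intro i hi1 hi2
      have hia : i < ans.length := by simpa using hi2
      by_cases hie : i = m
      · subst hie
        rw [List.getElem_set_self (by simpa using hia)]
        rw [List.getD_eq_getElem _ _ (by simpa using hia)]
        simp only [List.getElem_mapIdx]
        rw [if_neg (by omega), if_pos (by omega)]
      · rw [List.getElem_set_ne (by omega)]
        simp only [List.getElem_mapIdx]
        by_cases h1 : i < m
        · rw [if_pos h1, if_pos (by omega)]
        · rw [if_neg h1, if_neg (by omega)]

theorem mapIdx_eq_zip_map (ans off : List Int) (hlen : ans.length ≤ off.length)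
    (f : Nat → Int) (hf : ∀ i, i < ans.length → off.getD i 0 = f i) :
    (ans.zip off).map (fun p => p.1 + p.2) = ans.mapIdx (fun i y => y + f i) := by
  apply List.ext_getElem
  · simp; omega
  · intro i hi1 hi2
    simp only [List.length_map, List.length_zip] at hi1
    have hia : i < ans.length := by omega
    have hio : i < off.length := by omega
    simp only [List.getElem_map, List.getElem_zip, List.getElem_mapIdx]
    rw [← hf i hia, List.getD_eq_getElem _ _ hio]

theorem convert_without_line_eq_alt (x : List Int) (h_ : List (List Int)) (v : List (List Int))
    (hh : h_ ≠ []) :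
    convert_without_line x h_ v = convert_without_line_alt x h_ v := by
  unfold convert_without_line convert_without_line_alt
  simp only []
  set k := h_.length with hk
  have hkpos : 0 < k := by simp [hk, List.length_pos_iff, hh]
  set row := (h_.headD []).length with hrow
  set line_dim : Nat := row + k + 1 with hld
  have hcol : row + (k + 1) = line_dim := by omega
  have hldpos : 0 < line_dim := by omega
  rw [hcol]
  set line := PySem.List.slice x (some (-(line_dim : Int))) none with hline
  set ans := PySem.List.slice x none (some (-(line_dim : Int))) with hans
  have hline' : line = x.drop (x.length - line_dim) := by
    rw [hline, PySem.List.slice_from_neg_natCast x line_dim hldpos]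
  have hans' : ans = x.take (x.length - line_dim) := by
    rw [hans, PySem.List.slice_to_neg_natCast x line_dim hldpos]
  by_cases hemp : ans.isEmpty
  · rw [List.isEmpty_iff] at hemp
    simp [hemp]
  · rw [if_neg hemp]
    rw [List.isEmpty_iff] at hemp
    -- ans nonempty ⇒ x.length > line_dim ⇒ line has exactly line_dim elements
    have hxlen : line_dim < x.length := by
      by_contra hcon
      apply hemp
      rw [hans', List.take_eq_nil_iff]
      left
      omega
    have hlinelen : line.length = line_dim := by
      rw [hline', List.length_drop]; omega
    set n := ans.length with hn
    set h_dim : Nat := k * row with hhd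
    -- the common offset function
    set f : Nat → Int := fun a =>
      if a < h_dim then line.getD (a / (k + 1 - 1)) 0
      else line.getD ((a - h_dim) % (k + 1) + row) 0 with hf
    have hcongr : (List.range n).foldl
        (fun cur a =>
          if a < h_dim then cur.set a (cur.getD a 0 + line.getD (a / (k + 1 - 1)) 0)
          else cur.set a (cur.getD a 0 + line.getD ((a - h_dim) % (k + 1) + row) 0)) ans
        = (List.range n).foldl (fun (cur : List Int) (a : Nat) => cur.set a (cur.getD a 0 + f a)) ans :=
      PySem.List.foldl_congr_mem _ _ _ _ (by
        intro acc a _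
        by_cases hab : a < h_dim <;> simp [hf, hab])
    rw [hcongr, foldl_set_range f ans n (le_refl _)]
    have hblocklen : ((line.take row).flatMap (fun w => List.replicate k w)).length = h_dim := by
      simp only [List.length_flatMap, List.map_const', List.length_replicate, List.sum_replicate,
        smul_eq_mul, List.length_take, hlinelen]
      rw [hhd]
      have : min row line_dim = row := by omega
      simp [this]
      ring
    set off := (line.take row).flatMap (fun w => List.replicate k w) ++
      extendCyc (line.drop row) (k + 1) (n - ((line.take row).flatMap (fun w => List.replicate k w)).length) 0 with hoff
    have hofflen : n ≤ off.length := by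
      rw [hoff, List.length_append, extendCyc_length, hblocklen]
      omega
    rw [mapIdx_eq_zip_map ans off hofflen f ?_]
    · apply List.ext_getElem
      · simp
      · intro i hi1 hi2
        simp only [List.getElem_mapIdx]
        rw [if_pos (by simpa using hi1)]
    · intro i hi
      rw [hoff]
      by_cases hih : i < h_dim
      · have hlt1 : i < ((line.take row).flatMap (fun w => List.replicate k w)).length := by
          rw [hblocklen]; omega
        rw [List.getD_append _ _ _ _ hlt1]
        rw [flatMap_replicate_getD _ k i hkpos ?_]
        · have : (line.take row).getD (i / k) 0 = line.getD (i / k) 0 := by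
            have hidx : i / k < row := by
              apply Nat.div_lt_of_lt_mul
              omega
            rcases Nat.lt_or_ge (i / k) line.length with hlt | hge
            · rw [List.getD_eq_getElem _ _ (by simp [List.length_take]; omega),
                List.getD_eq_getElem _ _ hlt]
              simp
            · rw [List.getD_eq_default _ _ (by simp [List.length_take]; omega),
                List.getD_eq_default _ _ hge]
          rw [this, hf]
          simp [hih]
        · simp [List.length_take, hlinelen]
          rw [Nat.min_eq_left (by omega), Nat.mul_comm]
          omega
      · rw [List.getD_append_right _ _ _ _ (by rw [hblocklen]; omega), hblocklen]
        rw [extendCyc_getD _ _ _ _ _ (by omega)]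
        have hmodlt : (0 + (i - h_dim)) % (k + 1) < k + 1 := Nat.mod_lt _ (by omega)
        have hdq : (line.drop row).getD ((0 + (i - h_dim)) % (k + 1)) 0
            = line.getD ((0 + (i - h_dim)) % (k + 1) + row) 0 := by
          rw [List.getD_eq_getElem _ _ (by rw [List.length_drop, hlinelen]; omega),
            List.getD_eq_getElem _ _ (by rw [hlinelen]; omega)]
          rw [List.getElem_drop]
          congr 1
          omega
        rw [hdq, hf]
        simp only [Nat.zero_add]
        rw [if_neg (by omega)]

-- ===== VERDICT (by name: the statement is the Claim_ definition above) =====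
theorem convert_without_line_spec : Claim_equal_convert_without_line := by
  intro x h_ v _ hpre
  unfold Spec_convert_without_line
  exact convert_without_line_eq_alt x h_ v hpre.1
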